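-- pv_equiv track=rewrite | github.com/rlagusgh0223/Algorithm | 240707/프로그래머스, 수 조작하기 2.py | solution
-- ===== SOURCE A (Python) =====
-- def solution(numLog):
--     answer = ''
--     n = numLog[0]
--     for num in numLog[1:]:
--         if num == n+1:
--             answer += 'w'
--             n += 1
--         elif num == n-1:
--             answer += 's'
--             n -= 1
--         elif num == n+10:
--             answer += 'd'
--             n += 10
--         elif num == n-10:
--             answer += 'a'
--             n -= 10
--     return answer
-- ===== SOURCE B (Python) =====
-- def solution(numLog):
--     # pass 1: keep the subsequence of "accepted" positions (anchor chain)
--     anchors = [numLog[0]]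
--     for m in numLog[1:]:
--         if abs(m - anchors[-1]) in (1, 10):
--             anchors.append(m)
--     # pass 2: stateless pairwise map of the anchor chain's diffs to characters
--     table = {1: 'w', -1: 's', 10: 'd', -10: 'a'}
--     return ''.join(table[b - a] for a, b in zip(anchors, anchors[1:]))
-- ===== Notes on version B (the rewrite author's own statement) =====
-- stated objective: alternative
-- what changed: Replaces A's single fused stateful pass (if/elif chain appending to a string while tracking n) by two staged passes: pass 1 filters numLog into the accepted 'anchor' subsequence using only an abs-difference test against the last anchor, pass 2 statelessly maps each adjacent anchor pair's difference to its character via a table and joins.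
import Mathlib
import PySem

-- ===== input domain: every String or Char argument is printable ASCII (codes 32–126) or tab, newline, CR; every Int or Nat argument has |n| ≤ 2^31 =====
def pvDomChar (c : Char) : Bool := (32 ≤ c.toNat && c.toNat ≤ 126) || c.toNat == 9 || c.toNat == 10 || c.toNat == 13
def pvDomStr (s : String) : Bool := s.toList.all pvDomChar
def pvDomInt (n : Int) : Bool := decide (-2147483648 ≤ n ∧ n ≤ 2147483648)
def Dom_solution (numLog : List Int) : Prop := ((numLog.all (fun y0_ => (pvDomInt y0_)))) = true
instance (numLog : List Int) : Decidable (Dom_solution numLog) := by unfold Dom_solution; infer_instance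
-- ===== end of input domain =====

-- B replaces A's fused stateful pass by two staged passes: build the accepted 'anchor' subsequence (abs-diff test), then statelessly map adjacent anchor diffs to characters (alternative, same cost).

-- ===== PORT A =====
-- literal port of A: numLog[0], then a fold over numLog[1:] with state (answer, n)
def solutionStep (st : String × Int) (num : Int) : String × Int :=
  if num = st.2 + 1 then (st.1 ++ "w", st.2 + 1)
  else if num = st.2 - 1 then (st.1 ++ "s", st.2 - 1)
  else if num = st.2 + 10 then (st.1 ++ "d", st.2 + 10)
  else if num = st.2 - 10 then (st.1 ++ "a", st.2 - 10)
  else st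

def solution (numLog : List Int) : String :=
  match PySem.List.pyGet? numLog 0 with
  | none => ""  -- numLog[0] raises IndexError in Python; excluded by Pre_solution
  | some n0 => ((PySem.List.slice numLog (some 1) none).foldl solutionStep ("", n0)).1

-- ===== PORT B =====
-- pass 1: anchors = [numLog[0]]; append m iff abs(m - anchors[-1]) in (1, 10)
-- (anchors[-1] is always in range since anchors starts nonempty; pyGetD's default is never used)
def anchorStep (l : List Int) (m : Int) : List Int :=
  if (m - PySem.List.pyGetD l (-1) 0).natAbs = 1 ∨ (m - PySem.List.pyGetD l (-1) 0).natAbs = 10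
  then l ++ [m] else l

def pvTable : PySem.Dict Int String :=
  (PySem.Dict.empty).insert 1 "w" |>.insert (-1) "s" |>.insert 10 "d" |>.insert (-10) "a"

-- pass 2: ''.join(table[b - a] for a, b in zip(anchors, anchors[1:]))
-- (table[b - a] never raises KeyError by pass 1's test, so getD's default "" is never used)
def solution_alt (numLog : List Int) : String :=
  match PySem.List.pyGet? numLog 0 with
  | none => ""  -- numLog[0] raises IndexError in Python; excluded by Pre_solution
  | some n0 =>
    let anchors := (PySem.List.slice numLog (some 1) none).foldl anchorStep [n0]
    String.join ((anchors.zip (PySem.List.slice anchors (some 1) none)).map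
      (fun p => PySem.Dict.getD pvTable (p.2 - p.1) ""))

-- ===== PRECONDITION & SPEC =====
-- A (and B) raise IndexError on the empty list (numLog[0]); Pre_ excludes exactly that.
def Pre_solution (numLog : List Int) : Prop := numLog ≠ []
instance (numLog : List Int) : Decidable (Pre_solution numLog) := by unfold Pre_solution; infer_instance
def pvWitness_solution : List Int := [1, 2, 12, 11, 1]
def Spec_solution (numLog : List Int) (out : String) : Prop := out = solution_alt numLog
instance (numLog : List Int) (out : String) : Decidable (Spec_solution numLog out) := by unfold Spec_solution; infer_instance

-- ===== CLAIM =====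
def Claim_equal_solution : Prop := ∀ (numLog : List Int), Dom_solution numLog → Pre_solution numLog → Spec_solution numLog (solution numLog)

-- ===== LEMMAS AND PROOFS =====
-- reference function: the string both programs denote
def goRef (n : Int) (tl : List Int) : String :=
  match tl with
  | [] => ""
  | m :: t =>
    if m = n + 1 then "w" ++ goRef (n + 1) t
    else if m = n - 1 then "s" ++ goRef (n - 1) t
    else if m = n + 10 then "d" ++ goRef (n + 10) t
    else if m = n - 10 then "a" ++ goRef (n - 10) t
    else goRef n t

def charsOf (l : List Int) : String :=
  String.join ((l.zip l.tail).map (fun p => PySem.Dict.getD pvTable (p.2 - p.1) ""))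

theorem join_append (l : List String) (c : String) :
    String.join (l ++ [c]) = String.join l ++ c := by
  simp [String.join, List.foldl_append]

theorem zip_tail_append (l : List Int) (h : l ≠ []) (m : Int) :
    (l ++ [m]).zip (l ++ [m]).tail = l.zip l.tail ++ [(l.getLast h, m)] := by
  induction l with
  | nil => exact absurd rfl h
  | cons a t ih =>
    cases t with
    | nil => simp
    | cons b t' =>
      have := ih (by simp)
      simp only [List.cons_append, List.tail_cons, List.zip_cons_cons] at this ⊢
      rw [this]
      simp [List.getLast]

theorem charsOf_append (l : List Int) (h : l ≠ []) (m : Int) :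
    charsOf (l ++ [m]) = charsOf l ++ PySem.Dict.getD pvTable (m - l.getLast h) "" := by
  unfold charsOf
  rw [zip_tail_append l h m, List.map_append, List.map_singleton, join_append]

theorem foldA (tl : List Int) : ∀ (acc : String) (n : Int),
    (tl.foldl solutionStep (acc, n)).1 = acc ++ goRef n tl := by
  induction tl with
  | nil => intro acc n; simp [goRef]
  | cons m t ih =>
    intro acc n
    simp only [List.foldl_cons, solutionStep, goRef]
    by_cases h1 : m = n + 1
    · rw [if_pos h1, if_pos h1, ih, String.append_assoc]
    · rw [if_neg h1, if_neg h1]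
      by_cases h2 : m = n - 1
      · rw [if_pos h2, if_pos h2, ih, String.append_assoc]
      · rw [if_neg h2, if_neg h2]
        by_cases h3 : m = n + 10
        · rw [if_pos h3, if_pos h3, ih, String.append_assoc]
        · rw [if_neg h3, if_neg h3]
          by_cases h4 : m = n - 10
          · rw [if_pos h4, if_pos h4, ih, String.append_assoc]
          · rw [if_neg h4, if_neg h4, ih]

theorem foldB (tl : List Int) : ∀ (l : List Int) (h : l ≠ []) (n : Int), l.getLast h = n →
    charsOf (tl.foldl anchorStep l) = charsOf l ++ goRef n tl := by
  induction tl with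
  | nil => intro l h n _; simp [goRef]
  | cons m t ih =>
    intro l h n hlast
    have hlast' : PySem.List.pyGetD l (-1) 0 = n := by
      rw [PySem.List.pyGetD_neg_one l 0 h, hlast]
    simp only [List.foldl_cons, anchorStep, hlast', goRef]
    by_cases hm : (m - n).natAbs = 1 ∨ (m - n).natAbs = 10
    · rw [if_pos hm]
      have hne : l ++ [m] ≠ [] := by simp
      have hl2 : (l ++ [m]).getLast hne = m := by simp
      rw [ih (l ++ [m]) hne m hl2, charsOf_append l h m, hlast]
      have hd : m = n + 1 ∨ m = n - 1 ∨ m = n + 10 ∨ m = n - 10 := by omega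
      rcases hd with h' | h' | h' | h'
      · subst h'
        rw [if_pos rfl, show n + 1 - n = (1 : Int) by ring, String.append_assoc]
        norm_num [pvTable, PySem.Dict.getD, PySem.Dict.get?_insert, PySem.Dict.get?_empty]
      · subst h'
        rw [if_neg (by omega), if_pos rfl, show n - 1 - n = (-1 : Int) by ring,
          String.append_assoc]
        norm_num [pvTable, PySem.Dict.getD, PySem.Dict.get?_insert, PySem.Dict.get?_empty]
      · subst h'
        rw [if_neg (by omega), if_neg (by omega), if_pos rfl,
          show n + 10 - n = (10 : Int) by ring, String.append_assoc]
        norm_num [pvTable, PySem.Dict.getD, PySem.Dict.get?_insert, PySem.Dict.get?_empty]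
      · subst h'
        rw [if_neg (by omega), if_neg (by omega), if_neg (by omega), if_pos rfl,
          show n - 10 - n = (-10 : Int) by ring, String.append_assoc]
        norm_num [pvTable, PySem.Dict.getD, PySem.Dict.get?_insert, PySem.Dict.get?_empty]
    · rw [if_neg hm, if_neg (by omega : ¬ m = n + 1), if_neg (by omega : ¬ m = n - 1),
        if_neg (by omega : ¬ m = n + 10), if_neg (by omega : ¬ m = n - 10)]
      exact ih l h n hlast

-- ===== VERDICT =====
theorem solution_spec : Claim_equal_solution := by
  intro numLog _ hpre
  unfold Spec_solution solution solution_alt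
  cases numLog with
  | nil => exact absurd rfl hpre
  | cons n0 tl =>
    have hg : PySem.List.pyGet? (n0 :: tl) 0 = some n0 := by
      simp [PySem.List.pyGet?, PySem.List.pyIdx?]
    rw [hg]
    simp only [PySem.List.slice_from_one, List.tail_cons]
    have hB := foldB tl [n0] (by simp) n0 (by simp)
    rw [foldA tl "" n0]
    show "" ++ goRef n0 tl = charsOf (tl.foldl anchorStep [n0])
    rw [hB]
    simp [charsOf, String.join]
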